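-- pv_equiv track=rewrite | github.com/Xplouder/PoC-Part1 | Week 1/Merge.py | can_shift
-- ===== SOURCE A (Python) =====
-- def can_shift(array):
--     """
--     Function that informs if the array can be shifted
--     :param array: elements list
--     :return: boolean
--     """
--
--     has_first_non_zero = False
--     first_non_zero_index = -1
--     has_consecutive_zero = False
--     has_last_non_zero = False
--
--     for i in range(len(array)):
--         if array[i] != 0:
--             if not has_first_non_zero:
--                 has_first_non_zero = True
--                 first_non_zero_index = i
--                 continue
--             if has_consecutive_zero:
--                 has_last_non_zero = True
--         else:
--             if first_non_zero_index < i: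
--                 has_consecutive_zero = True
--
--         if has_first_non_zero and has_consecutive_zero and has_last_non_zero:
--             return True
--
--     return False
-- ===== SOURCE B (Python) =====
-- def can_shift(array):
--     f = next((i for i, x in enumerate(array) if x != 0), None)
--     z = next((i for i, x in enumerate(array) if x == 0), None)
--     if f is None or z is None:
--         return False
--     return any(x != 0 for x in array[max(f, z) + 1:])
-- ===== Notes on version B (the rewrite author's own statement) =====
-- stated objective: simpler
-- what changed: Replaces A's single stateful pass with four flags, a -1 sentinel index and an early return by a direct decomposition: find the first non-zero index and the first zero index, return False if either is missing, else scan the suffix after the later of the two for any non-zero.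
import Mathlib
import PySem

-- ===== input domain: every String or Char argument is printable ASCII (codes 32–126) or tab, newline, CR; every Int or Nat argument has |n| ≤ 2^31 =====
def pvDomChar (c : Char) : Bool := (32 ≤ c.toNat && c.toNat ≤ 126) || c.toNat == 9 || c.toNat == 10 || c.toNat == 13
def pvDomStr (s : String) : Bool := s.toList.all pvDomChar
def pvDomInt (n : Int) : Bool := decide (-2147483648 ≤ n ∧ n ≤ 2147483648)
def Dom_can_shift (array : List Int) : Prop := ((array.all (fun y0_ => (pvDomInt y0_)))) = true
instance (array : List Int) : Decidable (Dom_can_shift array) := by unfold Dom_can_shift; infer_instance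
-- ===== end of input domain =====

-- B replaces A's single stateful four-flag pass by two first-index searches plus a suffix scan
-- (objective: simpler); same return value on every input, no side effects.

-- ===== PORT A =====
-- literal transliteration of A's for-loop: state (i, has_first_non_zero, first_non_zero_index,
-- has_consecutive_zero, has_last_non_zero), early return modelled by returning true.
def canShiftLoopA : List Int → Int → Bool → Int → Bool → Bool → Bool
  | [], _, _, _, _, _ => false
  | x :: rest, i, hfnz, fnzi, hcz, hlnz =>
    if x ≠ 0 then
      if !hfnz then
        canShiftLoopA rest (i + 1) true i hcz hlnz   -- `continue`
      else
        let hlnz := if hcz then true else hlnz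
        if hfnz && hcz && hlnz then true
        else canShiftLoopA rest (i + 1) hfnz fnzi hcz hlnz
    else
      let hcz := if fnzi < i then true else hcz
      if hfnz && hcz && hlnz then true
      else canShiftLoopA rest (i + 1) hfnz fnzi hcz hlnz

def can_shift (array : List Int) : Bool := canShiftLoopA array 0 false (-1) false false

-- ===== PORT B =====
-- f = next((i for i,x in enumerate(array) if x != 0), None); z likewise for x == 0;
-- array[max(f,z)+1:] is PySem.List.slice with a nonnegative start.
def can_shift_alt (array : List Int) : Bool :=
  let f := ((PySem.List.enumerate array).find? (fun p => p.2 != 0)).map (·.1)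
  let z := ((PySem.List.enumerate array).find? (fun p => p.2 == 0)).map (·.1)
  match f, z with
  | some f, some z => (PySem.List.slice array (some (max f z + 1)) none).any (fun x => x != 0)
  | _, _ => false

-- ===== PRECONDITION & SPEC =====
def Spec_can_shift (array : List Int) (out : Bool) : Prop := out = can_shift_alt array
instance (array : List Int) (out : Bool) : Decidable (Spec_can_shift array out) := by unfold Spec_can_shift; infer_instance

-- ===== CLAIM (what is proved, stated in full; the proofs are below) =====
def Claim_equal_can_shift : Prop := ∀ (array : List Int), Dom_can_shift array → Spec_can_shift array (can_shift array)

-- ===== LEMMAS AND PROOFS =====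

-- abstract two-flag machine: sn = "a non-zero has been consumed", sz = "a zero has been consumed"
def pvM : List Int → Bool → Bool → Bool
  | [], _, _ => false
  | x :: t, sn, sz => if x ≠ 0 then (if sn && sz then true else pvM t true sz) else pvM t sn true

-- first index of a zero / of a non-zero
def fz : List Int → Option Nat
  | [] => none
  | x :: t => if x = 0 then some 0 else (fz t).map (· + 1)

def fn : List Int → Option Nat
  | [] => none
  | x :: t => if x ≠ 0 then some 0 else (fn t).map (· + 1)

theorem A_eq_M : ∀ (l : List Int) (i : Int) (hfnz : Bool) (fnzi : Int) (hcz : Bool),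
    fnzi < i → canShiftLoopA l i hfnz fnzi hcz false = pvM l hfnz hcz := by
  intro l
  induction l with
  | nil => intro _ _ _ _ _; rfl
  | cons x t ih =>
    intro i hfnz fnzi hcz hlt
    by_cases hx : x = 0
    · subst hx
      have step : canShiftLoopA (0 :: t) i hfnz fnzi hcz false
          = canShiftLoopA t (i + 1) hfnz fnzi true false := by
        simp [canShiftLoopA, hlt]
      rw [step, ih (i + 1) hfnz fnzi true (by omega)]
      simp [pvM]
    · cases hfnz with
      | false =>
        have step : canShiftLoopA (x :: t) i false fnzi hcz false
            = canShiftLoopA t (i + 1) true i hcz false := by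
          simp [canShiftLoopA, hx]
        rw [step, ih (i + 1) true i hcz (by omega)]
        simp [pvM, hx]
      | true =>
        cases hcz with
        | false =>
          have step : canShiftLoopA (x :: t) i true fnzi false false
              = canShiftLoopA t (i + 1) true fnzi false false := by
            simp [canShiftLoopA, hx]
          rw [step, ih (i + 1) true fnzi false (by omega)]
          simp [pvM, hx]
        | true =>
          have step : canShiftLoopA (x :: t) i true fnzi true false = true := by
            simp [canShiftLoopA, hx]
          rw [step]
          simp [pvM, hx]

theorem M_tt (l : List Int) : pvM l true true = l.any (fun x => x != 0) := by
  induction l with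
  | nil => rfl
  | cons x t ih =>
    by_cases hx : x = 0
    · subst hx; simpa [pvM] using ih
    · simp [pvM, hx]

theorem M_tf : ∀ (l : List Int), pvM l true false =
    (match fz l with
     | some z => (l.drop (z + 1)).any (fun x => x != 0)
     | none => false) := by
  intro l
  induction l with
  | nil => rfl
  | cons x t ih =>
    by_cases hx : x = 0
    · subst hx
      simp [pvM, fz, M_tt]
    · have step : pvM (x :: t) true false = pvM t true false := by simp [pvM, hx]
      have hfz : fz (x :: t) = (fz t).map (· + 1) := by simp [fz, hx]
      rw [step, ih, hfz]
      cases fz t with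
      | none => rfl
      | some z => simp [List.drop_succ_cons]

theorem M_ft : ∀ (l : List Int), pvM l false true =
    (match fn l with
     | some f => (l.drop (f + 1)).any (fun x => x != 0)
     | none => false) := by
  intro l
  induction l with
  | nil => rfl
  | cons x t ih =>
    by_cases hx : x = 0
    · subst hx
      have step : pvM (0 :: t) false true = pvM t false true := by simp [pvM]
      have hfn : fn (0 :: t) = (fn t).map (· + 1) := by simp [fn]
      rw [step, ih, hfn]
      cases fn t with
      | none => rfl
      | some f => simp [List.drop_succ_cons]
    · simp [pvM, fn, hx, M_tt]

theorem M_main : ∀ (l : List Int), pvM l false false =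
    (match fn l, fz l with
     | some f, some z => (l.drop (max f z + 1)).any (fun x => x != 0)
     | _, _ => false) := by
  intro l
  cases l with
  | nil => rfl
  | cons x t =>
    by_cases hx : x = 0
    · subst hx
      have step : pvM (0 :: t) false false = pvM t false true := by simp [pvM]
      have hfz : fz (0 :: t) = some 0 := by simp [fz]
      have hfn : fn (0 :: t) = (fn t).map (· + 1) := by simp [fn]
      rw [step, M_ft, hfn, hfz]
      cases fn t with
      | none => rfl
      | some f =>
        simp [List.drop_succ_cons]
    · have step : pvM (x :: t) false false = pvM t true false := by simp [pvM, hx]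
      have hfz : fz (x :: t) = (fz t).map (· + 1) := by simp [fz, hx]
      have hfn : fn (x :: t) = some 0 := by simp [fn, hx]
      rw [step, M_tf, hfn, hfz]
      cases fz t with
      | none => rfl
      | some z =>
        simp [List.drop_succ_cons]

-- bridge: the `next(enumerate …)` searches in B compute fz / fn (shifted by the start offset)
theorem findEnum_z : ∀ (l : List Int) (s : Int),
    ((PySem.List.enumerate l s).find? (fun p => p.2 == 0)).map (·.1)
      = Option.map (fun k : Nat => s + (k : Int)) (fz l) := by
  intro l
  induction l with
  | nil => intro s; rfl
  | cons x t ih =>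
    intro s
    rw [PySem.List.enumerate_cons]
    by_cases hx : x = 0
    · subst hx
      rw [List.find?_cons_of_pos (by simp)]
      simp [fz]
    · rw [List.find?_cons_of_neg (by simp [hx]), ih (s + 1)]
      have hfz : fz (x :: t) = (fz t).map (· + 1) := by simp [fz, hx]
      rw [hfz]
      cases fz t with
      | none => rfl
      | some k =>
        simp only [Option.map_some, Option.some.injEq]
        push_cast
        ring

theorem findEnum_n : ∀ (l : List Int) (s : Int),
    ((PySem.List.enumerate l s).find? (fun p => p.2 != 0)).map (·.1)
      = Option.map (fun k : Nat => s + (k : Int)) (fn l) := by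
  intro l
  induction l with
  | nil => intro s; rfl
  | cons x t ih =>
    intro s
    rw [PySem.List.enumerate_cons]
    by_cases hx : x = 0
    · subst hx
      rw [List.find?_cons_of_neg (by simp), ih (s + 1)]
      have hfn : fn ((0 : Int) :: t) = (fn t).map (· + 1) := by simp [fn]
      rw [hfn]
      cases fn t with
      | none => rfl
      | some k =>
        simp only [Option.map_some, Option.some.injEq]
        push_cast
        ring
    · rw [List.find?_cons_of_pos (by simp [hx])]
      have hfn : fn (x :: t) = some 0 := by simp [fn, hx]
      rw [hfn]
      simp

theorem B_eq_M (l : List Int) : can_shift_alt l = pvM l false false := by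
  unfold can_shift_alt
  rw [M_main, findEnum_n l 0, findEnum_z l 0]
  cases hfn : fn l with
  | none => cases hfz : fz l <;> rfl
  | some f =>
    cases hfz : fz l with
    | none => rfl
    | some z =>
      simp only [Option.map_some, zero_add]
      rw [show max (f : Int) (z : Int) + 1 = ((max f z + 1 : Nat) : Int) from by
            push_cast; omega,
        PySem.List.slice_from_natCast]

-- ===== VERDICT (by name: the statement is the Claim_ definition above) =====
theorem can_shift_spec : Claim_equal_can_shift := by
  intro array _
  unfold Spec_can_shift can_shift
  rw [B_eq_M]
  exact A_eq_M array 0 false (-1) false (by norm_num)
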